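-- pv_equiv track=rewrite | github.com/Kinshua/Siren | core/evasion/waf_bypass.py | _html_decimal
-- ===== SOURCE A (Python) =====
-- from typing import (
--     Any,
--     Callable,
--     Deque,
--     Dict,
--     FrozenSet,
--     List,
--     Optional,
--     Set,
--     Tuple,
--     Union,
-- )
--
-- def _html_decimal(payload: str) -> str:
--     """HTML decimal encoding: &#60;script&#62;."""
--     result: List[str] = []
--     for ch in payload:
--         if ch.isalnum():
--             result.append(ch)
--         else:
--             result.append(f"&#{ord(ch)};")
--     return "".join(result)
-- ===== SOURCE B (Python) =====
-- def _html_decimal(payload: str) -> str: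
--     """HTML decimal encoding by run-scanning: copy each maximal alphanumeric
--     run whole as one slice, then encode the single separator char after it."""
--     pieces = []
--     i, n = 0, len(payload)
--     while i < n:
--         j = i
--         while j < n and payload[j].isalnum():
--             j += 1
--         pieces.append(payload[i:j])
--         if j < n:
--             pieces.append(f"&#{ord(payload[j])};")
--             j += 1
--         i = j
--     return "".join(pieces)
-- ===== Notes on version B (the rewrite author's own statement) =====
-- stated objective: alternative
-- what changed: B is a run-based two-pointer scanner: it copies each maximal alphanumeric run as a single slice and encodes only the separator character after it, instead of A's uniform per-character append loop.
import Mathlib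
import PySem

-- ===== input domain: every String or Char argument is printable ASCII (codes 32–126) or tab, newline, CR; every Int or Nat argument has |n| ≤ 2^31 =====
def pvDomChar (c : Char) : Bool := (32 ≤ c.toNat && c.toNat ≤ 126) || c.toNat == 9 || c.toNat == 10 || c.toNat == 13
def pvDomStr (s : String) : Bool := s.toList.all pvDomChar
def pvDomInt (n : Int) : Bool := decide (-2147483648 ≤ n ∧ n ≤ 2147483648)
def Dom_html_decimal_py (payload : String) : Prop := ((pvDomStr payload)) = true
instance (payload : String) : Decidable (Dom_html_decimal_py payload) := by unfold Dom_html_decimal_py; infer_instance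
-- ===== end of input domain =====

-- B re-decomposes the work as a run-based scanner: each maximal alphanumeric run is copied
-- whole as one slice and only the separator character after it is encoded (alternative).


-- ===== PORT A =====
-- f"&#{ord(ch)};"  (shared literal helper; ord ch = ch.toNat as an Int)
def pvEnc (c : Char) : String := "&#" ++ PySem.Int.toStr (c.toNat : Int) ++ ";"

def html_decimal_py (payload : String) : String :=
  -- result = []; for ch in payload: append ch or the encoding; return "".join(result)
  let result : List String :=
    payload.toList.foldl
      (fun r ch => r ++ [if PySem.Chars.isalnum ch then String.ofList [ch] else pvEnc ch]) []
  PySem.Str.join "" result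

-- ===== PORT B =====
-- the outer while loop: the inner 'while j < n and payload[j].isalnum(): j += 1' finds the end
-- of the maximal alphanumeric run (= takeWhile/dropWhile split of the remaining suffix);
-- the run slice payload[i:j] is appended whole, then the separator payload[j] is encoded.
def pvRunGo (l : List Char) : List String :=
  if l = [] then []                        -- loop guard i < n
  else
    match h : l.dropWhile (fun c => PySem.Chars.isalnum c) with
    | [] => [String.ofList l]              -- j reached n: append payload[i:n], loop ends
    | c :: rest =>
        String.ofList (l.takeWhile (fun c => PySem.Chars.isalnum c))
          :: pvEnc c :: pvRunGo rest
termination_by l.length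
decreasing_by
  have h1 := List.length_dropWhile_le (fun c => PySem.Chars.isalnum c) l
  rw [h] at h1; simp at h1; omega

def html_decimal_py_alt (payload : String) : String :=
  PySem.Str.join "" (pvRunGo payload.toList)

-- ===== PRECONDITION & SPEC =====
def Spec_html_decimal_py (payload : String) (out : String) : Prop := out = html_decimal_py_alt payload
instance (payload : String) (out : String) : Decidable (Spec_html_decimal_py payload out) := by unfold Spec_html_decimal_py; infer_instance

-- ===== CLAIM (what is proved, stated in full; the proofs are below) =====
def Claim_equal_html_decimal_py : Prop := ∀ (payload : String), Dom_html_decimal_py payload → Spec_html_decimal_py payload (html_decimal_py payload)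

-- ===== LEMMAS AND PROOFS =====

-- both sides as flattened character lists
def pvF (ch : Char) : List Char :=
  if PySem.Chars.isalnum ch then [ch] else (pvEnc ch).toList

theorem flatMap_congr_mem {α β : Type} (l : List α) (f g : α → List β)
    (h : ∀ x ∈ l, f x = g x) : l.flatMap f = l.flatMap g := by
  induction l with
  | nil => rfl
  | cons c l ih =>
    rw [List.flatMap_cons, List.flatMap_cons, h c List.mem_cons_self,
        ih (fun x hx => h x (List.mem_cons_of_mem _ hx))]

theorem intercalate_nil_flatten (xs : List (List Char)) :
    List.intercalate [] xs = xs.flatten := by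
  induction xs with
  | nil => rfl
  | cons x xs ih =>
    cases xs with
    | nil => simp [List.intercalate]
    | cons y ys => simp [List.intercalate] at ih ⊢; simpa using ih

theorem join_eq_ofList_flatten (xs : List String) :
    PySem.Str.join "" xs = String.ofList (xs.map String.toList).flatten := by
  unfold PySem.Str.join PySem.Chars.join
  rw [show ("".toList : List Char) = [] from rfl, intercalate_nil_flatten]

theorem pieces_eq (l : List Char) :
    ((l.flatMap (fun ch => [if PySem.Chars.isalnum ch then String.ofList [ch] else pvEnc ch])).map
        String.toList).flatten = l.flatMap pvF := by
  induction l with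
  | nil => rfl
  | cons c l ih =>
    rw [List.flatMap_cons, List.flatMap_cons, List.map_append, List.flatten_append, ih]
    by_cases hal : PySem.Chars.isalnum c = true <;> simp [pvF, hal]

-- A's fold builds exactly the per-character pieces
theorem sideA_eq (payload : String) :
    html_decimal_py payload = String.ofList (payload.toList.flatMap pvF) := by
  unfold html_decimal_py
  rw [PySem.List.foldl_append_eq_flatMap
        (g := fun ch => [if PySem.Chars.isalnum ch then String.ofList [ch] else pvEnc ch]),
      List.nil_append, join_eq_ofList_flatten, pieces_eq]

-- B's run scanner flattens to the same per-character pieces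
theorem pvRunGo_flatten (l : List Char) :
    ((pvRunGo l).map String.toList).flatten = l.flatMap pvF := by
  by_cases hnil : l = []
  · subst hnil; rw [pvRunGo]; simp
  · rw [pvRunGo, if_neg hnil]
    split
    · rename_i h
      have hall : ∀ c ∈ l, PySem.Chars.isalnum c = true := by
        intro c hc
        exact List.dropWhile_eq_nil_iff.mp h c hc
      simp only [List.map, List.flatten]
      rw [flatMap_congr_mem _ _ (fun c => [c]) (fun c hc => by simp [pvF, hall c hc]),
          List.flatMap_singleton']
      simp
    · rename_i c rest h
      have hc : PySem.Chars.isalnum c = false := by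
        have hne : l.dropWhile (fun c => PySem.Chars.isalnum c) ≠ [] := by rw [h]; simp
        have := List.head_dropWhile_not (fun c => PySem.Chars.isalnum c) hne
        simp only [h, List.head_cons] at this
        exact this
      have hsplit : l = l.takeWhile (fun c => PySem.Chars.isalnum c) ++ c :: rest := by
        conv_lhs => rw [← List.takeWhile_append_dropWhile
          (p := fun c => PySem.Chars.isalnum c) (l := l)]
        rw [h]
      have ih := pvRunGo_flatten rest
      simp only [List.map, List.flatten]
      rw [ih]
      conv_rhs => rw [hsplit]
      rw [List.flatMap_append, List.flatMap_cons]
      have htake : (l.takeWhile (fun c => PySem.Chars.isalnum c)).flatMap pvF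
          = l.takeWhile (fun c => PySem.Chars.isalnum c) := by
        rw [flatMap_congr_mem _ _ (fun c => [c])
              (fun x hx => by simp [pvF, List.mem_takeWhile_imp hx]),
            List.flatMap_singleton']
      rw [htake]
      simp [pvF, hc]
termination_by l.length
decreasing_by
  have h1 := List.length_dropWhile_le (fun c => PySem.Chars.isalnum c) l
  rename_i hdrop _; rw [hdrop] at h1; simp at h1; omega

-- ===== VERDICT (by name: the statement is the Claim_ definition above) =====
theorem html_decimal_py_spec : Claim_equal_html_decimal_py := by
  intro payload _
  unfold Spec_html_decimal_py html_decimal_py_alt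
  rw [sideA_eq, join_eq_ofList_flatten, pvRunGo_flatten]
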